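-- pv_equiv track=rewrite | github.com/alexjh/whatson | django-view/whatson/musiclog/views.py | gen_colour_list
-- ===== SOURCE A (Python) =====
-- def gen_colour_list(length):
--     """Return a list of colours of size 'length'"""
--     colour = []
--     colour_seed = 0xF7464A
--
--     for _ in range(0, length):
--         colour.append("#%06X" % colour_seed)
--         colour_seed += 0xB46090
--         colour_seed %= 0xFFFFFF
--
--     return colour
-- ===== SOURCE B (Python) =====
-- def gen_colour_list(length):
--     """Return a list of colours of size 'length'"""
--     return ["#%06X" % ((0xF7464A + i * 0xB46090) % 0xFFFFFF) for i in range(length)]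
-- ===== Notes on version B (the rewrite author's own statement) =====
-- stated objective: simpler
-- what changed: Replaces the stateful seed recurrence with a closed-form per-index modular formula in a single list comprehension, dropping the carried accumulator.
import Mathlib
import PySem

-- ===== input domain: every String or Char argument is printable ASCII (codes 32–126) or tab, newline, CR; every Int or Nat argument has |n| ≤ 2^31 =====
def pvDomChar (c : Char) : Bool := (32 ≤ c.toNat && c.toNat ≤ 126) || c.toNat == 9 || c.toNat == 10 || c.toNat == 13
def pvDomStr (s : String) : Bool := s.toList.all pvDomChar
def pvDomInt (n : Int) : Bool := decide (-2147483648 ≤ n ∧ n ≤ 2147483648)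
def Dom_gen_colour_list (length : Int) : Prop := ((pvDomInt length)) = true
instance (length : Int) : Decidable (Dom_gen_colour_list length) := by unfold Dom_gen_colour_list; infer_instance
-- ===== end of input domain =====

-- B replaces A's carried colour_seed recurrence with a closed-form per-index modular formula (simpler: one comprehension, no accumulator).

-- ===== PORT A =====
-- shared helper: exact port of Python's  "#%06X" % n  for 0 ≤ n < 16^6 (every seed both programs format lies in this range)
def pvHexChar (d : Nat) : Char := if d < 10 then Char.ofNat (48 + d) else Char.ofNat (55 + d)
def pvHex6 (n : Int) : String := String.ofList ('#' :: ((List.range 6).map (fun j => pvHexChar (n.toNat / 16 ^ (5 - j) % 16))))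

def gen_colour_list (length : Int) : List String :=
  -- colour = []; colour_seed = 0xF7464A; for _ in range(0, length): append, step the seed
  ((PySem.List.pyRange 0 length 1).foldl
    (fun (st : List String × Int) _ =>
      (st.1 ++ [pvHex6 st.2], PySem.Int.mod (st.2 + 0xB46090) 0xFFFFFF))
    ([], 0xF7464A)).1

-- ===== PORT B =====
def gen_colour_list_alt (length : Int) : List String :=
  (PySem.List.pyRange 0 length 1).map
    (fun i => pvHex6 (PySem.Int.mod (0xF7464A + i * 0xB46090) 0xFFFFFF))

-- ===== PRECONDITION & SPEC =====
def Spec_gen_colour_list (length : Int) (out : List String) : Prop := out = gen_colour_list_alt length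
instance (length : Int) (out : List String) : Decidable (Spec_gen_colour_list length out) := by unfold Spec_gen_colour_list; infer_instance

-- ===== CLAIM (what is proved, stated in full; the proofs are below) =====
def Claim_equal_gen_colour_list : Prop := ∀ (length : Int), Dom_gen_colour_list length → Spec_gen_colour_list length (gen_colour_list length)

-- ===== LEMMAS AND PROOFS =====

def pvSeed (k : Nat) : Int := PySem.Int.mod (0xF7464A + (k : Int) * 0xB46090) 0xFFFFFF

-- one recurrence step of A's seed, stated with % (the normal form simp leaves for PySem.Int.mod)
lemma pvSeed_step (k : Nat) :
    (pvSeed k + 0xB46090) % 0xFFFFFF = pvSeed (k + 1) := by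
  unfold pvSeed
  simp only [PySem.Int.mod_eq_emod_of_pos (show (0:Int) < 16777215 by norm_num)]
  push_cast
  omega

-- the loop body ignores the range element, so the fold over any list depends only on its length
lemma pvFold_eq {α : Type} (l : List α) :
    (l.foldl
      (fun (st : List String × Int) (_ : α) =>
        (st.1 ++ [pvHex6 st.2], PySem.Int.mod (st.2 + 0xB46090) 0xFFFFFF))
      ([], 0xF7464A))
    = ((List.range l.length).map (fun i => pvHex6 (pvSeed i)), pvSeed l.length) := by
  induction l using List.reverseRecOn with
  | nil => simp [pvSeed]
  | append_singleton xs x ih =>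
    rw [List.foldl_append, ih]
    simp [List.range_succ, pvSeed_step]

theorem gen_colour_list_spec_aux (length : Int) :
    gen_colour_list length = gen_colour_list_alt length := by
  unfold gen_colour_list gen_colour_list_alt
  rw [PySem.List.pyRange_one, pvFold_eq, List.map_map]
  simp only [List.length_map, List.length_range]
  apply List.map_congr_left
  intro k _
  simp [pvSeed]

-- ===== VERDICT (by name: the statement is the Claim_ definition above) =====
theorem gen_colour_list_spec : Claim_equal_gen_colour_list := by
  intro length _
  exact gen_colour_list_spec_aux length
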